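-- pv_equiv track=rewrite | github.com/Hawkgrad2b/Movie-Ratings-Project | project2Phase1b.py | createRatingsDataStructure
-- ===== SOURCE A (Python) =====
-- def createRatingsDataStructure(numUsers, numItems, ratingTuples):
--
--     rLu=[]
--     rLm=[]
--
--     for user in range(numUsers):
--
--         tempDict = {}
--
--         for i in ratingTuples:
--             if (i[0] == user + 1):
--                 tempDict[i[1]] = i[2]
--
--         rLu.append(tempDict)
--
--     for movie in range(numItems):
--
--         tempDict={}
--
--         for i in ratingTuples:
--             if (i[1] == movie + 1):
--                 tempDict[i[0]] = i[2]
--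
--         rLm.append(tempDict)
--
--     return rLu, rLm
-- ===== SOURCE B (Python) =====
-- def createRatingsDataStructure(numUsers, numItems, ratingTuples):
--     rLu = [{} for _ in range(numUsers)]
--     rLm = [{} for _ in range(numItems)]
--     for (u, m, r) in ratingTuples:
--         if 1 <= u <= numUsers:
--             rLu[u - 1][m] = r
--         if 1 <= m <= numItems:
--             rLm[m - 1][u] = r
--     return rLu, rLm
-- ===== Notes on version B (the rewrite author's own statement) =====
-- stated objective: faster
-- what changed: Replaces the per-user and per-movie rescans of ratingTuples with one single pass over ratingTuples that writes each rating into preallocated lists of dicts indexed by user-1 / movie-1.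
import Mathlib
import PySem

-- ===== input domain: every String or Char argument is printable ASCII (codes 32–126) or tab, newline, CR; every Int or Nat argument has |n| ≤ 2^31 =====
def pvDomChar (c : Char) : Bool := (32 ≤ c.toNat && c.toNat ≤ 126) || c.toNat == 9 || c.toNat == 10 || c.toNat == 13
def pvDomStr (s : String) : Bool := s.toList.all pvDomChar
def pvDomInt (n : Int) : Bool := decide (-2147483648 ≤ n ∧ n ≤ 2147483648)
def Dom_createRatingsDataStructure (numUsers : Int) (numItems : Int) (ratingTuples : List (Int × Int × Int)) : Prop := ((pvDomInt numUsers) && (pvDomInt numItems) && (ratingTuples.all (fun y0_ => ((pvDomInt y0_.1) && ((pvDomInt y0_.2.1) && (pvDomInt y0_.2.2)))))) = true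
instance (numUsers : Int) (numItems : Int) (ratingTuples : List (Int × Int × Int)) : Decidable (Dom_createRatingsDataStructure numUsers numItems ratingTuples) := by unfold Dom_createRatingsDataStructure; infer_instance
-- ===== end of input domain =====

-- B replaces A's per-user and per-movie rescans of ratingTuples with ONE pass over
-- ratingTuples into preallocated lists of dicts (objective: faster, asymptotically).

-- ===== PORT A =====
def createRatingsDataStructure (numUsers : Int) (numItems : Int) (ratingTuples : List (Int × Int × Int)) : (List (List (Int × Int))) × (List (List (Int × Int))) :=
  let rLu := (PySem.List.pyRange 0 numUsers 1).foldl
    (fun rLu user =>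
      let tempDict := ratingTuples.foldl
        (fun d i => if i.1 == user + 1 then d.insert i.2.1 i.2.2 else d)
        (PySem.Dict.empty : PySem.Dict Int Int)
      rLu ++ [tempDict.items]) []
  let rLm := (PySem.List.pyRange 0 numItems 1).foldl
    (fun rLm movie =>
      let tempDict := ratingTuples.foldl
        (fun d i => if i.2.1 == movie + 1 then d.insert i.1 i.2.2 else d)
        (PySem.Dict.empty : PySem.Dict Int Int)
      rLm ++ [tempDict.items]) []
  (rLu, rLm)

-- ===== PORT B =====
def createRatingsDataStructure_alt (numUsers : Int) (numItems : Int) (ratingTuples : List (Int × Int × Int)) : (List (List (Int × Int))) × (List (List (Int × Int))) :=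
  let init : List (PySem.Dict Int Int) × List (PySem.Dict Int Int) :=
    (List.replicate numUsers.toNat PySem.Dict.empty, List.replicate numItems.toNat PySem.Dict.empty)
  let final := ratingTuples.foldl
    (fun s i =>
      let s1 := if 1 ≤ i.1 ∧ i.1 ≤ numUsers
        then (s.1.modify (i.1 - 1).toNat (fun d => d.insert i.2.1 i.2.2), s.2) else s
      if 1 ≤ i.2.1 ∧ i.2.1 ≤ numItems
        then (s1.1, s1.2.modify (i.2.1 - 1).toNat (fun d => d.insert i.1 i.2.2)) else s1)
    init
  (final.1.map PySem.Dict.items, final.2.map PySem.Dict.items)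

-- ===== PRECONDITION & SPEC =====
def Spec_createRatingsDataStructure (numUsers : Int) (numItems : Int) (ratingTuples : List (Int × Int × Int)) (out : (List (List (Int × Int))) × (List (List (Int × Int)))) : Prop := out = createRatingsDataStructure_alt numUsers numItems ratingTuples
instance (numUsers : Int) (numItems : Int) (ratingTuples : List (Int × Int × Int)) (out : (List (List (Int × Int))) × (List (List (Int × Int)))) : Decidable (Spec_createRatingsDataStructure numUsers numItems ratingTuples out) := by unfold Spec_createRatingsDataStructure; infer_instance

-- ===== CLAIM (what is proved, stated in full; the proofs are below) =====
def Claim_equal_createRatingsDataStructure : Prop := ∀ (numUsers : Int) (numItems : Int) (ratingTuples : List (Int × Int × Int)), Dom_createRatingsDataStructure numUsers numItems ratingTuples → Spec_createRatingsDataStructure numUsers numItems ratingTuples (createRatingsDataStructure numUsers numItems ratingTuples)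

-- ===== LEMMAS AND PROOFS =====

-- a fold whose step updates the two pair components independently splits into two folds
lemma pv_foldl_pair {α β γ : Type} (g1 : β → α → β) (g2 : γ → α → γ) :
    ∀ (l : List α) (a : β) (b : γ),
      l.foldl (fun s i => (g1 s.1 i, g2 s.2 i)) (a, b) = (l.foldl g1 a, l.foldl g2 b)
  | [], _, _ => rfl
  | x :: l, a, b => by
      simpa using pv_foldl_pair g1 g2 l (g1 a x) (g2 b x)

-- a fold of guarded in-place updates, read at one position k, is the fold of the
-- updates aimed at k applied to the initial element at k
lemma pv_getElem?_foldl_modify {α β : Type} (c : α → Prop) [DecidablePred c]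
    (idx : α → Nat) (f : α → β → β) :
    ∀ (l : List α) (L : List β) (k : Nat),
      (l.foldl (fun L i => if c i then L.modify (idx i) (f i) else L) L)[k]? =
        L[k]?.map (fun d => l.foldl (fun d i => if c i ∧ idx i = k then f i d else d) d)
  | [], L, k => by simp
  | x :: l, L, k => by
      rw [List.foldl_cons, pv_getElem?_foldl_modify c idx f l _ k]
      simp only [List.foldl_cons]
      have hstep : (if c x then L.modify (idx x) (f x) else L)[k]? =
          L[k]?.map (fun d => if c x ∧ idx x = k then f x d else d) := by
        by_cases hc : c x
        · simp only [if_pos hc, List.getElem?_modify]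
          cases L[k]? with
          | none => rfl
          | some d =>
            by_cases hi : idx x = k
            · simp [hi, hc]
            · simp [hi, hc]
        · rw [if_neg hc]
          cases L[k]? with
          | none => rfl
          | some d => simp [hc]
      rw [hstep]
      cases L[k]? <;> simp

-- one side of the structure: A's scan-per-index list equals B's single-pass fold
lemma pv_side (n : Int) (rt : List (Int × Int × Int))
    (sel key val : (Int × Int × Int) → Int) :
    (PySem.List.pyRange 0 n 1).map
        (fun u => (rt.foldl
          (fun d i => if sel i == u + 1 then d.insert (key i) (val i) else d)
          (PySem.Dict.empty : PySem.Dict Int Int)).items) =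
      (rt.foldl
        (fun L i => if 1 ≤ sel i ∧ sel i ≤ n
          then L.modify (sel i - 1).toNat (fun d => d.insert (key i) (val i)) else L)
        (List.replicate n.toNat (PySem.Dict.empty : PySem.Dict Int Int))).map
        PySem.Dict.items := by
  apply List.ext_getElem?
  intro k
  simp only [List.getElem?_map,
    pv_getElem?_foldl_modify (fun i => 1 ≤ sel i ∧ sel i ≤ n)
      (fun i => (sel i - 1).toNat) (fun i (d : PySem.Dict Int Int) => d.insert (key i) (val i)),
    PySem.List.getElem?_pyRange_one, List.getElem?_replicate]
  by_cases hk : k < (n - 0).toNat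
  · have hk' : k < n.toNat := by omega
    rw [if_pos hk, if_pos hk']
    simp only [Option.map_some]
    congr 1
    have hstep : (fun (d : PySem.Dict Int Int) (i : Int × Int × Int) =>
          if sel i == 0 + (k : Int) + 1 then d.insert (key i) (val i) else d) =
        (fun (d : PySem.Dict Int Int) (i : Int × Int × Int) =>
          if (1 ≤ sel i ∧ sel i ≤ n) ∧ (sel i - 1).toNat = k
          then d.insert (key i) (val i) else d) := by
      funext d i
      have hcond : (sel i == 0 + (k : Int) + 1) = true ↔
          ((1 ≤ sel i ∧ sel i ≤ n) ∧ (sel i - 1).toNat = k) := by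
        rw [beq_iff_eq]; omega
      by_cases h : (1 ≤ sel i ∧ sel i ≤ n) ∧ (sel i - 1).toNat = k
      · rw [if_pos (hcond.mpr h), if_pos h]
      · rw [if_neg (fun hb => h (hcond.mp hb)), if_neg h]
    rw [hstep]
  · have hk' : ¬ k < n.toNat := by omega
    rw [if_neg hk, if_neg hk']
    rfl

-- ===== VERDICT (by name: the statement is the Claim_ definition above) =====
theorem createRatingsDataStructure_spec : Claim_equal_createRatingsDataStructure := by
  intro numUsers numItems ratingTuples _
  unfold Spec_createRatingsDataStructure createRatingsDataStructure createRatingsDataStructure_alt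
  simp only [PySem.List.foldl_append_singleton_eq_map, List.nil_append]
  have hpair : (fun (s : List (PySem.Dict Int Int) × List (PySem.Dict Int Int))
        (i : Int × Int × Int) =>
      let s1 := if 1 ≤ i.1 ∧ i.1 ≤ numUsers
        then (s.1.modify (i.1 - 1).toNat (fun d => d.insert i.2.1 i.2.2), s.2) else s
      if 1 ≤ i.2.1 ∧ i.2.1 ≤ numItems
        then (s1.1, s1.2.modify (i.2.1 - 1).toNat (fun d => d.insert i.1 i.2.2)) else s1) =
      (fun s i =>
        ((fun L i => if 1 ≤ i.1 ∧ i.1 ≤ numUsers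
            then List.modify L (i.1 - 1).toNat (fun d => d.insert i.2.1 i.2.2) else L) s.1 i,
         (fun L i => if 1 ≤ i.2.1 ∧ i.2.1 ≤ numItems
            then List.modify L (i.2.1 - 1).toNat (fun d => d.insert i.1 i.2.2) else L) s.2 i)) := by
    funext s i
    dsimp only
    split_ifs <;> rfl
  have hsplit := pv_foldl_pair
    (fun L (i : Int × Int × Int) => if 1 ≤ i.1 ∧ i.1 ≤ numUsers
        then List.modify L (i.1 - 1).toNat (fun d => d.insert i.2.1 i.2.2) else L)
    (fun L (i : Int × Int × Int) => if 1 ≤ i.2.1 ∧ i.2.1 ≤ numItems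
        then List.modify L (i.2.1 - 1).toNat (fun d => d.insert i.1 i.2.2) else L)
    ratingTuples
    (List.replicate numUsers.toNat (PySem.Dict.empty : PySem.Dict Int Int))
    (List.replicate numItems.toNat (PySem.Dict.empty : PySem.Dict Int Int))
  rw [hpair, hsplit]
  refine Prod.ext ?_ ?_
  · exact pv_side numUsers ratingTuples (fun i => i.1) (fun i => i.2.1) (fun i => i.2.2)
  · exact pv_side numItems ratingTuples (fun i => i.2.1) (fun i => i.1) (fun i => i.2.2)
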